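-- pv_equiv track=rewrite | github.com/MrBrantCode/unitest_baseline | mut_generate/mist_train_cf/cf_74616/solution.py | common_alphabets
-- ===== SOURCE A (Python) =====
-- def common_alphabets(str1, str2, case_insensitive=True):
--     # Filter out non-alphabetic characters and adjust case
--     str1 = ''.join(filter(str.isalpha, str1))
--     str2 = ''.join(filter(str.isalpha, str2))
--
--     if case_insensitive:
--         str1 = str1.lower()
--         str2 = str2.lower()
--
--     common_char = set(str1).intersection(set(str2))
--     common_char_dict = {}
--
--     for char in common_char:
--         common_char_dict[char] = min(str1.count(char), str2.count(char))
--
--     return common_char_dict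
-- ===== SOURCE B (Python) =====
-- def common_alphabets(str1, str2, case_insensitive=True):
--     # Sort the filtered letters of each string and run one two-pointer merge
--     # over the two sorted sequences, recording min(run length) per shared letter.
--     a = sorted(c.lower() if case_insensitive else c for c in str1 if c.isalpha())
--     b = sorted(c.lower() if case_insensitive else c for c in str2 if c.isalpha())
--     res = {}
--     i = j = 0
--     while i < len(a) and j < len(b):
--         if a[i] == b[j]:
--             c = a[i]
--             i2, j2 = i, j
--             while i2 < len(a) and a[i2] == c:
--                 i2 += 1
--             while j2 < len(b) and b[j2] == c:
--                 j2 += 1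
--             res[c] = min(i2 - i, j2 - j)
--             i, j = i2, j2
--         elif a[i] < b[j]:
--             i += 1
--         else:
--             j += 1
--     return res
-- ===== Notes on version B (the rewrite author's own statement) =====
-- stated objective: alternative
-- what changed: B replaces A's set-intersection plus a str.count scan of both strings per common character by sorting the filtered letters of each string and doing one two-pointer merge over the two sorted sequences, measuring equal runs and recording min(run1, run2) per shared letter; the dict output is order-insensitive.
import Mathlib
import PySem

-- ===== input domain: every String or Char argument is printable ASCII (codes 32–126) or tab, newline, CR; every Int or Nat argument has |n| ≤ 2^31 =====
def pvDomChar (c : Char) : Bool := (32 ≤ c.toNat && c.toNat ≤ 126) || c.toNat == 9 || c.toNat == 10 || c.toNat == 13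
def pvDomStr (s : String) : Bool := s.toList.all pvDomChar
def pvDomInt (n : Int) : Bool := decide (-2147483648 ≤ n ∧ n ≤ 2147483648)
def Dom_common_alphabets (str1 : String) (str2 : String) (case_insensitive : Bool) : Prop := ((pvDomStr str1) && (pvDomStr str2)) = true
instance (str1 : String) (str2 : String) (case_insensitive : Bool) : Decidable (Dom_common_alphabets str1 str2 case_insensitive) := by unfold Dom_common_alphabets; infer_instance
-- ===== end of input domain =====

-- B sorts the filtered letters of both strings and runs one two-pointer run-merge
-- instead of A's set-intersection plus a str.count scan per common character; the
-- Python dict output is order-insensitive, both ports fix sorted key order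
-- (Python's set/hash iteration order over 1-char strings is run-randomized and not modelled).

-- ===== PORT A =====
def common_alphabets (str1 : String) (str2 : String) (case_insensitive : Bool) : List (String × Int) :=
  let s1 := str1.toList.filter PySem.Chars.isalpha
  let s2 := str2.toList.filter PySem.Chars.isalpha
  let s1 := if case_insensitive then PySem.Chars.lower s1 else s1
  let s2 := if case_insensitive then PySem.Chars.lower s2 else s2
  let common := PySem.List.sorted
    (PySem.Set.inter (PySem.Set.ofList s1) (PySem.Set.ofList s2)) (fun c => c) false
  let d := common.foldl
    (fun d c => d.insert c (min (s1.count c : Int) (s2.count c : Int))) PySem.Dict.empty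
  d.items.map (fun p => (String.ofList [p.1], p.2))

-- ===== PORT B =====
-- the two-pointer while loop of Source B: when the heads match, the inner
-- 'while a[i2]==c' / 'while b[j2]==c' scans are the takeWhile lengths and the
-- pointer jumps are the dropWhile tails; otherwise advance the smaller side
def pvMerge : List Char → List Char → List (Char × Int)
  | [], _ => []
  | _ :: _, [] => []
  | x :: xs, y :: ys =>
    if x = y then
      (x, min ((xs.takeWhile (· == x)).length + 1 : Int) ((ys.takeWhile (· == x)).length + 1 : Int))
        :: pvMerge (xs.dropWhile (· == x)) (ys.dropWhile (· == x))
    else if x < y then pvMerge xs (y :: ys)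
    else pvMerge (x :: xs) ys
termination_by a b => a.length + b.length
decreasing_by
  · have h1 := List.length_dropWhile_le (p := (· == x)) (l := xs)
    have h2 := List.length_dropWhile_le (p := (· == x)) (l := ys)
    simp only [List.length_cons]; omega
  · simp only [List.length_cons]; omega
  · simp only [List.length_cons]; omega

def common_alphabets_alt (str1 : String) (str2 : String) (case_insensitive : Bool) : List (String × Int) :=
  let a := PySem.List.sorted
    (str1.toList.filterMap
      (fun c => if PySem.Chars.isalpha c then some (if case_insensitive then PySem.Chars.lowerChar c else c) else none))
    (fun c => c) false
  let b := PySem.List.sorted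
    (str2.toList.filterMap
      (fun c => if PySem.Chars.isalpha c then some (if case_insensitive then PySem.Chars.lowerChar c else c) else none))
    (fun c => c) false
  (pvMerge a b).map (fun p => (String.ofList [p.1], p.2))

-- ===== PRECONDITION & SPEC =====
def Spec_common_alphabets (str1 : String) (str2 : String) (case_insensitive : Bool) (out : List (String × Int)) : Prop := out = common_alphabets_alt str1 str2 case_insensitive
instance (str1 : String) (str2 : String) (case_insensitive : Bool) (out : List (String × Int)) : Decidable (Spec_common_alphabets str1 str2 case_insensitive out) := by unfold Spec_common_alphabets; infer_instance

-- ===== CLAIM =====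
def Claim_equal_common_alphabets : Prop := ∀ (str1 : String) (str2 : String) (case_insensitive : Bool), Dom_common_alphabets str1 str2 case_insensitive → Spec_common_alphabets str1 str2 case_insensitive (common_alphabets str1 str2 case_insensitive)

-- ===== LEMMAS AND PROOFS =====

-- B's comprehension '[f(c) for c in s if p(c)]' equals A's filter-then-map pipeline
theorem filterMap_if_eq_map_filter {α β : Type} (l : List α) (p : α → Bool) (f : α → β) :
    l.filterMap (fun c => if p c then some (f c) else none) = (l.filter p).map f := by
  induction l with
  | nil => rfl
  | cons x xs ih => by_cases h : p x <;> simp [h, ih]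

-- after dropping the leading run of x from a ≤-sorted list, everything left is > x
theorem mem_dropWhile_gt (x : Char) (xs : List Char) (hs : xs.Pairwise (· ≤ ·))
    (hge : ∀ e ∈ xs, x ≤ e) : ∀ e ∈ xs.dropWhile (· == x), x < e := by
  induction xs with
  | nil => simp
  | cons z zs ih =>
    by_cases hz : z = x
    · subst hz
      simp only [List.dropWhile_cons, beq_self_eq_true, if_true]
      exact ih (hs.of_cons) (fun e he => (List.pairwise_cons.mp hs).1 e he)
    · have hzx : x < z := lt_of_le_of_ne (hge z (by simp)) (Ne.symm hz)
      simp only [List.dropWhile_cons, beq_iff_eq, hz, if_false]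
      intro e he
      rcases List.mem_cons.mp he with rfl | he'
      · exact hzx
      · exact lt_of_lt_of_le hzx ((List.pairwise_cons.mp hs).1 e he')

-- count split along takeWhile/dropWhile
theorem count_split (xs : List Char) (x c : Char) :
    xs.count c = (xs.takeWhile (· == x)).count c + (xs.dropWhile (· == x)).count c := by
  conv_lhs => rw [← List.takeWhile_append_dropWhile (p := (· == x)) (l := xs)]
  rw [List.count_append]

theorem count_takeWhile_self (xs : List Char) (x : Char) :
    (xs.takeWhile (· == x)).count x = (xs.takeWhile (· == x)).length :=
  List.count_eq_length.mpr (fun a ha => by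
    have hp := List.mem_takeWhile_imp (p := (· == x)) (l := xs) ha
    exact (beq_iff_eq.mp hp).symm)

theorem count_takeWhile_ne (xs : List Char) (x c : Char) (hc : c ≠ x) :
    (xs.takeWhile (· == x)).count c = 0 :=
  List.count_eq_zero.mpr (fun hmem => hc (by simpa using List.mem_takeWhile_imp hmem))

-- pvMerge on ≤-sorted inputs: entries are (c, min of the two counts), keys are
-- strictly sorted and are exactly the common characters
theorem pvMerge_spec : ∀ (n : Nat) (a b : List Char), a.length + b.length ≤ n →
    a.Pairwise (· ≤ ·) → b.Pairwise (· ≤ ·) →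
    ∃ K : List Char,
      pvMerge a b = K.map (fun c => (c, min ((a.count c : Int)) ((b.count c : Int)))) ∧
      K.Pairwise (· < ·) ∧ (∀ c, c ∈ K ↔ c ∈ a ∧ c ∈ b) := by
  intro n
  induction n with
  | zero =>
    intro a b hlen _ _
    have ha : a = [] := by cases a <;> simp_all
    subst ha
    exact ⟨[], by simp [pvMerge], by simp, by simp⟩
  | succ n ih =>
    intro a b hlen ha hb
    match a, b with
    | [], b => exact ⟨[], by simp [pvMerge], by simp, by simp⟩
    | x :: xs, [] => exact ⟨[], by simp [pvMerge], by simp, by simp⟩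
    | x :: xs, y :: ys =>
      have hxs_ge : ∀ e ∈ xs, x ≤ e := (List.pairwise_cons.mp ha).1
      have hys_ge : ∀ e ∈ ys, y ≤ e := (List.pairwise_cons.mp hb).1
      by_cases hxy : x = y
      · subst hxy
        -- equal heads
        set d1 := xs.dropWhile (· == x) with hd1
        set d2 := ys.dropWhile (· == x) with hd2
        have hlt1 : ∀ e ∈ d1, x < e := mem_dropWhile_gt x xs ha.of_cons hxs_ge
        have hlt2 : ∀ e ∈ d2, x < e := mem_dropWhile_gt x ys hb.of_cons hys_ge
        have hlen1 : d1.length ≤ xs.length := List.length_dropWhile_le _ xs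
        have hlen2 : d2.length ≤ ys.length := List.length_dropWhile_le _ ys
        obtain ⟨K', heq', hstr', hmem'⟩ := ih d1 d2 (by simp at hlen; omega)
          (ha.of_cons.sublist (List.dropWhile_sublist _))
          (hb.of_cons.sublist (List.dropWhile_sublist _))
        refine ⟨x :: K', ?_, ?_, ?_⟩
        · show pvMerge (x :: xs) (x :: ys) = _
          have hcx1 : (x :: xs).count x = (xs.takeWhile (· == x)).length + 1 := by
            rw [List.count_cons_self, count_split xs x x, count_takeWhile_self,
                List.count_eq_zero.mpr (fun h => lt_irrefl x (hlt1 x h))]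
          have hcx2 : (x :: ys).count x = (ys.takeWhile (· == x)).length + 1 := by
            rw [List.count_cons_self, count_split ys x x, count_takeWhile_self,
                List.count_eq_zero.mpr (fun h => lt_irrefl x (hlt2 x h))]
          have htail : K'.map (fun c => (c, min ((d1.count c : Int)) ((d2.count c : Int))))
              = K'.map (fun c => (c, min (((x :: xs).count c : Int)) (((x :: ys).count c : Int)))) := by
            refine List.map_congr_left (fun c hc => ?_)
            have hcd : c ∈ d1 ∧ c ∈ d2 := (hmem' c).mp hc
            have hcx : x < c := hlt1 c hcd.1
            have h1 : (x :: xs).count c = d1.count c := by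
              rw [List.count_cons_of_ne hcx.ne, count_split xs x c,
                  count_takeWhile_ne xs x c hcx.ne']
              simp [hd1]
            have h2 : (x :: ys).count c = d2.count c := by
              rw [List.count_cons_of_ne hcx.ne, count_split ys x c,
                  count_takeWhile_ne ys x c hcx.ne']
              simp [hd2]
            rw [h1, h2]
          rw [pvMerge]
          simp only [← hd1, ← hd2, heq', htail, List.map_cons, hcx1, hcx2]
          push_cast
          ring_nf
        · exact List.pairwise_cons.mpr ⟨fun c hc => hlt1 c ((hmem' c).mp hc).1, hstr'⟩
        · intro c
          constructor
          · intro hc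
            rcases List.mem_cons.mp hc with rfl | hc'
            · exact ⟨List.mem_cons_self, List.mem_cons_self⟩
            · obtain ⟨h1, h2⟩ := (hmem' c).mp hc'
              exact ⟨List.mem_cons_of_mem _ ((List.dropWhile_sublist _).mem h1),
                     List.mem_cons_of_mem _ ((List.dropWhile_sublist _).mem h2)⟩
          · rintro ⟨h1, h2⟩
            by_cases hcx : c = x
            · exact hcx ▸ List.mem_cons_self
            · refine List.mem_cons_of_mem _ ((hmem' c).mpr ⟨?_, ?_⟩)
              · rcases List.mem_cons.mp h1 with rfl | h1'
                · exact absurd rfl hcx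
                · rw [← List.takeWhile_append_dropWhile (p := (· == x)) (l := xs)] at h1'
                  rcases List.mem_append.mp h1' with h | h
                  · exact absurd (by simpa using List.mem_takeWhile_imp h) hcx
                  · exact h
              · rcases List.mem_cons.mp h2 with rfl | h2'
                · exact absurd rfl hcx
                · rw [← List.takeWhile_append_dropWhile (p := (· == x)) (l := ys)] at h2'
                  rcases List.mem_append.mp h2' with h | h
                  · exact absurd (by simpa using List.mem_takeWhile_imp h) hcx
                  · exact h
      · by_cases hlt : x < y
        · -- advance left
          obtain ⟨K', heq', hstr', hmem'⟩ := ih xs (y :: ys) (by simp at hlen ⊢; omega)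
            ha.of_cons hb
          have hyb : ∀ c ∈ y :: ys, x < c := by
            intro c hc
            rcases List.mem_cons.mp hc with rfl | hc'
            · exact hlt
            · exact lt_of_lt_of_le hlt (hys_ge c hc')
          refine ⟨K', ?_, hstr', ?_⟩
          · show pvMerge (x :: xs) (y :: ys) = _
            rw [pvMerge]
            simp only [if_neg hxy, if_pos hlt, heq']
            refine List.map_congr_left (fun c hc => ?_)
            have hcb : c ∈ y :: ys := ((hmem' c).mp hc).2
            have : (x :: xs).count c = xs.count c :=
              List.count_cons_of_ne (hyb c hcb).ne
            simp [this]
          · intro c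
            rw [hmem' c]
            constructor
            · rintro ⟨h1, h2⟩; exact ⟨List.mem_cons_of_mem _ h1, h2⟩
            · rintro ⟨h1, h2⟩
              refine ⟨?_, h2⟩
              rcases List.mem_cons.mp h1 with rfl | h1'
              · exact absurd (hyb c h2) (lt_irrefl c)
              · exact h1'
        · -- advance right
          have hylt : y < x := by
            rcases lt_trichotomy x y with h | h | h
            · exact absurd h hlt
            · exact absurd h hxy
            · exact h
          obtain ⟨K', heq', hstr', hmem'⟩ := ih (x :: xs) ys (by simp at hlen ⊢; omega)
            ha hb.of_cons
          have hxa : ∀ c ∈ x :: xs, y < c := by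
            intro c hc
            rcases List.mem_cons.mp hc with rfl | hc'
            · exact hylt
            · exact lt_of_lt_of_le hylt (hxs_ge c hc')
          refine ⟨K', ?_, hstr', ?_⟩
          · show pvMerge (x :: xs) (y :: ys) = _
            rw [pvMerge]
            simp only [if_neg hxy, if_neg hlt, heq']
            refine List.map_congr_left (fun c hc => ?_)
            have hca : c ∈ x :: xs := ((hmem' c).mp hc).1
            have : (y :: ys).count c = ys.count c :=
              List.count_cons_of_ne (hxa c hca).ne
            simp [this]
          · intro c
            rw [hmem' c]
            constructor
            · rintro ⟨h1, h2⟩; exact ⟨h1, List.mem_cons_of_mem _ h2⟩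
            · rintro ⟨h1, h2⟩
              refine ⟨h1, ?_⟩
              rcases List.mem_cons.mp h2 with rfl | h2'
              · exact absurd (hxa c h1) (lt_irrefl c)
              · exact h2'

-- A's dict fold over nodup keys, collapsed to a map
theorem itemsA (common : List Char) (hnd : common.Nodup) (f : Char → Int) :
    (common.foldl (fun d c => d.insert c (f c)) PySem.Dict.empty).items
      = common.map (fun c => (c, f c)) := by
  have := PySem.Dict.items_foldl_insert_fresh (l := common) (k := id) (v := f)
    (d := PySem.Dict.empty) (by simp [pysem]) (by simpa using hnd)
  simpa using this

-- two strictly-sorted char lists with the same members are equal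
theorem strict_sorted_ext (K1 K2 : List Char) (h1 : K1.Pairwise (· < ·)) (h2 : K2.Pairwise (· < ·))
    (hm : ∀ c, c ∈ K1 ↔ c ∈ K2) : K1 = K2 := by
  have nd1 : K1.Nodup := h1.imp (fun h => ne_of_lt h)
  have nd2 : K2.Nodup := h2.imp (fun h => ne_of_lt h)
  have hp : List.Perm K1 K2 := (List.perm_ext_iff_of_nodup nd1 nd2).mpr hm
  exact hp.eq_of_pairwise (fun a b _ _ u v => le_antisymm (le_of_lt u) (le_of_lt v)) h1 h2

theorem common_alphabets_eq (str1 str2 : String) (ci : Bool) :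
    common_alphabets str1 str2 ci = common_alphabets_alt str1 str2 ci := by
  unfold common_alphabets common_alphabets_alt
  dsimp only
  set s1 := (if ci then PySem.Chars.lower (str1.toList.filter PySem.Chars.isalpha)
             else str1.toList.filter PySem.Chars.isalpha) with hs1
  set s2 := (if ci then PySem.Chars.lower (str2.toList.filter PySem.Chars.isalpha)
             else str2.toList.filter PySem.Chars.isalpha) with hs2
  have ha : str1.toList.filterMap
      (fun c => if PySem.Chars.isalpha c then some (if ci then PySem.Chars.lowerChar c else c) else none) = s1 := by
    rw [hs1]; cases ci <;>
      simp [filterMap_if_eq_map_filter, PySem.Chars.lower, List.map_id']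
  have hb : str2.toList.filterMap
      (fun c => if PySem.Chars.isalpha c then some (if ci then PySem.Chars.lowerChar c else c) else none) = s2 := by
    rw [hs2]; cases ci <;>
      simp [filterMap_if_eq_map_filter, PySem.Chars.lower, List.map_id']
  rw [ha, hb]
  set I := PySem.Set.inter (PySem.Set.ofList s1) (PySem.Set.ofList s2) with hI
  set common := PySem.List.sorted I (fun c => c) false with hcommon
  set a := PySem.List.sorted s1 (fun c => c) false with hA
  set b := PySem.List.sorted s2 (fun c => c) false with hB
  -- A's dict items
  have hndI : I.Nodup := PySem.Set.nodup_inter _ _ (PySem.Set.nodup_ofList s1)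
  have hpermc : List.Perm common I := PySem.List.sorted_perm I (fun c => c) false
  have hndc : common.Nodup := hpermc.symm.nodup hndI
  rw [itemsA common hndc]
  -- B's merge
  have hpa : a.Pairwise (· ≤ ·) := PySem.List.sorted_pairwise s1 (fun c => c)
  have hpb : b.Pairwise (· ≤ ·) := PySem.List.sorted_pairwise s2 (fun c => c)
  obtain ⟨K, heq, hstr, hmem⟩ := pvMerge_spec (a.length + b.length) a b le_rfl hpa hpb
  rw [heq]
  have hcstr : common.Pairwise (· < ·) := by
    have hle : common.Pairwise (· ≤ ·) := PySem.List.sorted_pairwise I (fun c => c)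
    exact (hle.and hndc).imp (fun h => lt_of_le_of_ne h.1 h.2)
  have hKeq : common = K := by
    apply strict_sorted_ext _ _ hcstr hstr
    intro c
    rw [hcommon, PySem.List.mem_sorted, hI, PySem.Set.mem_inter, PySem.Set.mem_ofList,
        PySem.Set.mem_ofList, hmem c, hA, hB, PySem.List.mem_sorted, PySem.List.mem_sorted]
  rw [hKeq]
  congr 1
  refine List.map_congr_left (fun c _ => ?_)
  have h1 : a.count c = s1.count c := (PySem.List.sorted_perm s1 (fun c => c) false).count_eq c
  have h2 : b.count c = s2.count c := (PySem.List.sorted_perm s2 (fun c => c) false).count_eq c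
  rw [h1, h2]

-- ===== VERDICT =====
theorem common_alphabets_spec : Claim_equal_common_alphabets := by
  intro str1 str2 ci _
  unfold Spec_common_alphabets
  exact common_alphabets_eq str1 str2 ci
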